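-- pv_equiv track=rewrite | github.com/ShiraseAkira/ATaFL | all_in_one/lab2.py | get_zero_equivalent_classes
-- ===== SOURCE A (Python) =====
-- def get_zero_equivalent_classes(signals, states):
--     classes = {}
--     for i in range(len(signals)):
--         if signals[i] in classes:
--             classes[signals[i]].append(states[i])
--         else:
--             classes[signals[i]] = [states[i]]
--
--     return classes
-- ===== SOURCE B (Python) =====
-- def get_zero_equivalent_classes(signals, states):
--     # Different decomposition: first the distinct signal values in first-occurrence
--     # order, then one filtering pass per key over the zipped (signal, state) pairs.
--     keys = list(dict.fromkeys(signals))
--     return {sig: [st for sg, st in zip(signals, states) if sg == sig] for sig in keys}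
-- ===== Notes on version B (the rewrite author's own statement) =====
-- stated objective: alternative
-- what changed: Replaces A's single accumulating dict pass with a keys-then-filter decomposition: compute distinct signals via dict.fromkeys, then build each class by one filtering comprehension over zip(signals, states).
import Mathlib
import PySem

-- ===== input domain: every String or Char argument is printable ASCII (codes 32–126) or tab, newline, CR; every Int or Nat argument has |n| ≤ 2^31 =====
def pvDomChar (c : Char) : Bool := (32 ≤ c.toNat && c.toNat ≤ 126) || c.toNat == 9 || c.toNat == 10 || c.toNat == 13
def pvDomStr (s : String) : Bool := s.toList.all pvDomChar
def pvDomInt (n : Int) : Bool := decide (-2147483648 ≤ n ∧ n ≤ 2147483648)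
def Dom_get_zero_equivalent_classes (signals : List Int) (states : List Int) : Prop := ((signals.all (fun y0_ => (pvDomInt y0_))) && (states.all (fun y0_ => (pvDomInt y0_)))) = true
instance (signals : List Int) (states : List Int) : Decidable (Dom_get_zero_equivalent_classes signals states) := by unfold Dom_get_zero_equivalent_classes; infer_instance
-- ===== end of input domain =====

-- B groups states by their signal by first computing the distinct signals and then
-- filtering the zipped pairs once per key, instead of A's single accumulating dict pass.
-- ===== PORT A =====
-- literal port of A: for i in range(len(signals)): append states[i] to classes[signals[i]]
-- (pyGetD's default is never used: under Pre_ the index i is in range of both lists)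
def get_zero_equivalent_classes (signals : List Int) (states : List Int) : List (Int × List Int) :=
  ((PySem.List.pyRange 0 (PySem.List.len signals) 1).foldl
    (fun classes i =>
      if classes.contains (PySem.List.pyGetD signals i 0) then
        classes.insert (PySem.List.pyGetD signals i 0)
          (classes.getD (PySem.List.pyGetD signals i 0) [] ++ [PySem.List.pyGetD states i 0])
      else
        classes.insert (PySem.List.pyGetD signals i 0) [PySem.List.pyGetD states i 0])
    PySem.Dict.empty).items

-- ===== PORT B =====
-- port of Source B: keys = list(dict.fromkeys(signals)); per key, filter zip(signals, states)
def get_zero_equivalent_classes_alt (signals : List Int) (states : List Int) : List (Int × List Int) :=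
  (PySem.List.dedup signals).map (fun sig =>
    (sig, ((signals.zip states).filter (fun p => p.1 == sig)).map (fun p => p.2)))

-- ===== PRECONDITION & SPEC =====
-- A raises IndexError on states[i] when states is shorter than signals; exactly those inputs are excluded.
def Pre_get_zero_equivalent_classes (signals : List Int) (states : List Int) : Prop :=
  signals.length ≤ states.length
instance (signals : List Int) (states : List Int) : Decidable (Pre_get_zero_equivalent_classes signals states) := by unfold Pre_get_zero_equivalent_classes; infer_instance
def pvWitness_get_zero_equivalent_classes : List Int × List Int := ([1, 2, 1, 3], [10, 20, 30, 40])

def Spec_get_zero_equivalent_classes (signals : List Int) (states : List Int) (out : List (Int × List Int)) : Prop := out = get_zero_equivalent_classes_alt signals states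
instance (signals : List Int) (states : List Int) (out : List (Int × List Int)) : Decidable (Spec_get_zero_equivalent_classes signals states out) := by unfold Spec_get_zero_equivalent_classes; infer_instance

-- ===== CLAIM (what is proved, stated in full; the proofs are below) =====
def Claim_equal_get_zero_equivalent_classes : Prop := ∀ (signals : List Int) (states : List Int), Dom_get_zero_equivalent_classes signals states → Pre_get_zero_equivalent_classes signals states → Spec_get_zero_equivalent_classes signals states (get_zero_equivalent_classes signals states)
-- ===== LEMMAS AND PROOFS =====

-- A's index loop over range(len(signals)) is the same accumulation as a fold over
-- zip(signals, states) once states is at least as long as signals.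
theorem idx_fold_eq_zip_fold (signals states : List Int)
    (h : signals.length ≤ states.length) (d : PySem.Dict Int (List Int)) :
    (List.range signals.length).foldl
      (fun classes n =>
        if classes.contains (signals.getD n 0) then
          classes.insert (signals.getD n 0)
            (classes.getD (signals.getD n 0) [] ++ [states.getD n 0])
        else
          classes.insert (signals.getD n 0) [states.getD n 0]) d
    = (signals.zip states).foldl
      (fun classes p =>
        if classes.contains p.1 then
          classes.insert p.1 (classes.getD p.1 [] ++ [p.2])
        else
          classes.insert p.1 [p.2]) d := by
  induction signals generalizing states d with
  | nil => simp
  | cons a s ih =>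
    cases states with
    | nil => simp at h
    | cons b t =>
      simp only [List.length_cons, List.range_succ_eq_map, List.foldl_cons, List.foldl_map,
        List.getD_cons_zero, List.getD_cons_succ, List.zip_cons_cons]
      exact ih t (by simpa using h) _

theorem step_eq_modify (classes : PySem.Dict Int (List Int)) (p : Int × Int) :
    (if classes.contains p.1 then
        classes.insert p.1 (classes.getD p.1 [] ++ [p.2])
      else
        classes.insert p.1 [p.2])
    = classes.modify p.1 [] (fun v => v ++ [p.2]) := by
  by_cases hc : classes.contains p.1
  · simp [hc, PySem.Dict.modify]
  · simp only [Bool.not_eq_true] at hc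
    rw [PySem.Dict.getD_of_not_contains classes [] hc] at *
    simp [hc, PySem.Dict.modify, PySem.Dict.getD_of_not_contains classes ([] : List Int) hc]

-- ===== VERDICT (by name: the statement is the Claim_ definition above) =====
theorem get_zero_equivalent_classes_spec : Claim_equal_get_zero_equivalent_classes := by
  intro signals states _ hpre
  unfold Spec_get_zero_equivalent_classes
  unfold get_zero_equivalent_classes get_zero_equivalent_classes_alt
  unfold Pre_get_zero_equivalent_classes at hpre
  have hrange : PySem.List.pyRange 0 (PySem.List.len signals) 1
      = (List.range signals.length).map (fun k : Nat => (k : Int)) := by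
    rw [PySem.List.len_eq]
    exact PySem.List.pyRange_zero_natCast _
  rw [hrange]
  simp only [List.foldl_map, PySem.List.pyGetD_natCast]
  rw [idx_fold_eq_zip_fold signals states hpre]
  have hfold : ((signals.zip states).foldl
      (fun classes p =>
        if classes.contains p.1 then
          classes.insert p.1 (classes.getD p.1 [] ++ [p.2])
        else classes.insert p.1 [p.2]) PySem.Dict.empty)
      = (signals.zip states).foldl
        (fun (classes : PySem.Dict Int (List Int)) (p : Int × Int) =>
          classes.modify p.1 [] (fun v => v ++ [p.2])) PySem.Dict.empty := by
    exact List.foldl_ext _ _ _ (fun acc p _ => step_eq_modify acc p)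
  rw [hfold]
  set D := (signals.zip states).foldl
      (fun (classes : PySem.Dict Int (List Int)) (p : Int × Int) =>
        classes.modify p.1 [] (fun v => v ++ [p.2])) PySem.Dict.empty with hD
  have hnd : D.keys.Nodup := by
    rw [hD]
    exact PySem.Dict.nodup_keys_foldl_modify_key (signals.zip states)
      (fun (p : Int × Int) => p.1) []
      (fun (_ : PySem.Dict Int (List Int)) (p : Int × Int) (v : List Int) => v ++ [p.2])
      PySem.Dict.empty (by simp [PySem.Dict.keys_empty])
  have hkeys : D.keys = PySem.List.dedup signals := by
    rw [hD, PySem.Dict.keys_foldl_modify_key]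
    have : (signals.zip states).map Prod.fst = signals := List.map_fst_zip hpre
    rw [PySem.Dict.keys_empty, this, PySem.Set.update_nil_left]
    simp
  have hval : ∀ k, D.getD k [] = ((signals.zip states).filter (fun p => p.1 == k)).map (fun p => p.2) := by
    intro k
    rw [hD, PySem.Dict.getD_foldl_modify_append]
    simp [PySem.Dict.getD_empty]
  rw [PySem.Dict.items_eq_map_keys D hnd [], hkeys]
  exact List.map_congr_left (fun k _ => by rw [hval k])
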